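-- pv_equiv track=rewrite | github.com/jslusarczykk/pythonuczelnia | 04-Subroutines/zad36ikolejne.py | person3
-- ===== SOURCE A (Python) =====
-- def person3(x):
--     count=0
--     for i in range(len(x)):
--         if(x[i]=="-"):
--             count=0
--         if(x[i]=="+"):
--             count+=1
--         if(count==3):
--             return True
--     return False
-- ===== SOURCE B (Python) =====
-- def person3(x):
--     return any(seg.count('+') >= 3 for seg in x.split('-'))
-- ===== Notes on version B (the rewrite author's own statement) =====
-- stated objective: simpler
-- what changed: Replaces the stateful single pass with a counter reset on dashes by a declarative split on the dash delimiter followed by a per-segment plus count, a one-line any(...); the work moves into C-level str methods.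
import Mathlib
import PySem

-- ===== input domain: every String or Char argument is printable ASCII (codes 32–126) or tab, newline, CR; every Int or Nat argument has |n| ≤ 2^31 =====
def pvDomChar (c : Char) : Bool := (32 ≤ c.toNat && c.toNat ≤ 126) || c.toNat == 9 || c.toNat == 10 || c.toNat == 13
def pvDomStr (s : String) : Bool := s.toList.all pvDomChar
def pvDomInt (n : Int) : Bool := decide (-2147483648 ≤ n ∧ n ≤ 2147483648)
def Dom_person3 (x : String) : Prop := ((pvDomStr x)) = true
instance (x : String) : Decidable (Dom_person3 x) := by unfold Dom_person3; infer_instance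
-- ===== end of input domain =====

-- B replaces A's single stateful pass (counter reset on '-') by split-on-'-' plus a per-segment '+' count; objective: simpler.


-- ===== PORT A =====
-- the for-loop over the characters with the running counter and the early 'return True'
def person3Loop : List Char → Int → Bool
  | [], _ => false
  | ch :: rest, count =>
    let count := if ch = '-' then 0 else count
    let count := if ch = '+' then count + 1 else count
    if count = 3 then true else person3Loop rest count

def person3 (x : String) : Bool := person3Loop x.toList 0

-- ===== PORT B =====
-- Source B: any(seg.count('+') >= 3 for seg in x.split('-'))
def person3_alt (x : String) : Bool :=
  (PySem.Chars.splitOn x.toList ['-']).any (fun seg => decide (3 ≤ PySem.Chars.count seg ['+']))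

-- ===== PRECONDITION & SPEC =====
def Spec_person3 (x : String) (out : Bool) : Prop := out = person3_alt x
instance (x : String) (out : Bool) : Decidable (Spec_person3 x out) := by unfold Spec_person3; infer_instance

-- ===== CLAIM (what is proved, stated in full; the proofs are below) =====
def Claim_equal_person3 : Prop := ∀ (x : String), Dom_person3 x → Spec_person3 x (person3 x)

-- ===== LEMMAS AND PROOFS =====

-- counting '+' via PySem.Chars.count.go is List.count
theorem countGo_plus (l : List Char) (fuel acc : Nat) (h : l.length ≤ fuel) :
    PySem.Chars.count.go ['+'] fuel l acc = acc + l.count '+' := by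
  induction l generalizing fuel acc with
  | nil => cases fuel <;> simp [PySem.Chars.count.go]
  | cons c t ih =>
    cases fuel with
    | zero => simp at h
    | succ f =>
      have hfle : t.length ≤ f := by simpa using Nat.le_of_succ_le_succ h
      simp only [PySem.Chars.count.go, List.isPrefixOf, Bool.and_true]
      by_cases hc : c = '+'
      · subst hc
        simp only [beq_self_eq_true, if_true]
        rw [show List.drop ['+'].length ('+' :: t) = t from rfl, ih f (acc + 1) hfle]
        simp
        omega
      · rw [beq_eq_false_iff_ne.mpr (Ne.symm hc)]
        simp only [Bool.false_eq_true, if_false]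
        rw [ih f acc hfle]
        simp [hc]

theorem count_plus (l : List Char) : PySem.Chars.count l ['+'] = l.count '+' := by
  simp [PySem.Chars.count, countGo_plus l l.length 0 (le_refl _)]

-- the accumulator of splitOn.go is just prepended (reversed)
theorem goAcc (fuel : Nat) (l cur : List Char) (acc : List (List Char)) :
    PySem.Chars.splitOn.go ['-'] fuel l cur acc =
      acc.reverse ++ PySem.Chars.splitOn.go ['-'] fuel l cur [] := by
  induction fuel generalizing l cur acc with
  | zero => simp [PySem.Chars.splitOn.go]
  | succ f ih =>
    cases l with
    | nil => simp [PySem.Chars.splitOn.go]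
    | cons c t =>
      simp only [PySem.Chars.splitOn.go, List.isPrefixOf, Bool.and_true]
      by_cases hc : ('-' == c) = true
      · simp only [hc, if_true]
        rw [show List.drop ['-'].length (c :: t) = t from rfl]
        rw [ih t [] (cur.reverse :: acc), ih t [] [cur.reverse]]
        simp
      · simp only [hc, Bool.false_eq_true, if_false]
        exact ih t (c :: cur) acc

def pvPred (seg : List Char) : Bool := decide (3 ≤ seg.count '+')

-- once the current segment already holds three pluses, B finds one
theorem goSat (l : List Char) (fuel : Nat) (cur : List Char)
    (hf : l.length ≤ fuel) (h3 : 3 ≤ cur.count '+') :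
    (PySem.Chars.splitOn.go ['-'] fuel l cur []).any pvPred = true := by
  induction l generalizing fuel cur with
  | nil =>
    cases fuel <;>
      simp_all [PySem.Chars.splitOn.go, pvPred, List.count_reverse]
  | cons c t ih =>
    cases fuel with
    | zero => simp at hf
    | succ f =>
      have hfle : t.length ≤ f := by simpa using Nat.le_of_succ_le_succ hf
      simp only [PySem.Chars.splitOn.go, List.isPrefixOf, Bool.and_true]
      by_cases hc : ('-' == c) = true
      · simp only [hc, if_true]
        rw [show List.drop ['-'].length (c :: t) = t from rfl, goAcc]
        simp only [List.any_append, List.any_reverse, List.any_cons, List.any_nil,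
          Bool.or_false, Bool.or_eq_true]
        left
        simp [pvPred, List.count_reverse]
        omega
      · simp only [hc, Bool.false_eq_true, if_false]
        apply ih f (c :: cur) hfle
        rw [List.count_cons]
        split <;> omega

-- main invariant: B's per-segment scan simulates A's loop
theorem goMain (l : List Char) (fuel : Nat) (cur : List Char)
    (hf : l.length ≤ fuel) (h3 : cur.count '+' < 3) :
    (PySem.Chars.splitOn.go ['-'] fuel l cur []).any pvPred
      = person3Loop l (cur.count '+' : Int) := by
  induction l generalizing fuel cur with
  | nil =>
    cases fuel <;>
      simp_all [PySem.Chars.splitOn.go, pvPred, person3Loop, List.count_reverse]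
  | cons c t ih =>
    cases fuel with
    | zero => simp at hf
    | succ f =>
      have hfle : t.length ≤ f := by simpa using Nat.le_of_succ_le_succ hf
      simp only [PySem.Chars.splitOn.go, List.isPrefixOf, Bool.and_true]
      by_cases hc : c = '-'
      · subst hc
        simp only [beq_self_eq_true, if_true]
        rw [show List.drop ['-'].length ('-' :: t) = t from rfl, goAcc]
        rw [List.any_append]
        have h0 : ([] : List Char).count '+' < 3 := by simp
        have hrec := ih f [] hfle h0
        simp only [List.count_nil, Nat.cast_zero] at hrec
        rw [hrec]
        have hpf : pvPred cur.reverse = false := by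
          simp [pvPred, List.count_reverse]; omega
        simp [hpf, person3Loop]
      · rw [beq_eq_false_iff_ne.mpr (Ne.symm hc)]
        simp only [Bool.false_eq_true, if_false]
        by_cases hp : c = '+'
        · subst hp
          have hcount : ('+' :: cur).count '+' = cur.count '+' + 1 := by
            simp
          by_cases h2 : cur.count '+' + 1 < 3
          · rw [ih f ('+' :: cur) hfle (by omega), hcount]
            simp only [person3Loop, hc]
            have h33 : ((cur.count '+' : Int) + 1 = 3) = False := by
              simp; omega
            simp only [if_true, h33, if_false]
            norm_cast
          · rw [goSat t f ('+' :: cur) hfle (by omega)]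
            have hcc : cur.count '+' = 2 := by omega
            simp [person3Loop, hc, hcc]
        · rw [ih f (c :: cur) hfle (by simp [hp]; omega)]
          rw [show (c :: cur).count '+' = cur.count '+' from by simp [hp]]
          simp only [person3Loop, if_neg hc, if_neg hp]
          have h33 : ((cur.count '+' : Int) = 3) = False := by simp; omega
          simp [h33]

-- ===== VERDICT (by name: the statement is the Claim_ definition above) =====
theorem person3_spec : Claim_equal_person3 := by
  intro x _
  unfold Spec_person3 person3 person3_alt PySem.Chars.splitOn
  have hpred : (fun seg => decide (3 ≤ PySem.Chars.count seg ['+'])) = pvPred := by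
    funext seg; simp [pvPred, count_plus]
  rw [hpred, goMain x.toList (x.toList.length + 1) [] (by omega) (by simp)]
  simp
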